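-- pv_equiv track=rewrite | github.com/razvan404/ubb-projects | 1st Semester/Computational Logic/Electronic Project/BaseCalculator/Domain/Fast_Converts.py | from2toPower
-- ===== SOURCE A (Python) =====
-- def from2toPower(groups, power):
--     '''
--     Transformă fiecare grupuleț în câte un singur
--     număr, corespunzător tabelelor de conversie
--     rapidă din baza 2 în baza 2 la puterea *power*
--     :param groups: list of lists
--     :param power: integer
--     :return: list of lists
--     '''
--     if power == 2:
--         for i in range(0, len(groups)):
--             if groups[i] == [0, 0]:
--                 groups[i] = [0]
--             elif groups[i] == [0, 1]:
--                 groups[i] = [1]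
--             elif groups[i] == [1, 0]:
--                 groups[i] = [2]
--             elif groups[i] == [1, 1]:
--                 groups[i] = [3]
--     if power == 3:
--         for i in range(0, len(groups)):
--             if groups[i] == [0, 0, 0]:
--                 groups[i] = [0]
--             elif groups[i] == [0, 0, 1]:
--                 groups[i] = [1]
--             elif groups[i] == [0, 1, 0]:
--                 groups[i] = [2]
--             elif groups[i] == [0, 1, 1]:
--                 groups[i] = [3]
--             elif groups[i] == [1, 0, 0]:
--                 groups[i] = [4]
--             elif groups[i] == [1, 0, 1]:
--                 groups[i] = [5]
--             elif groups[i] == [1, 1, 0]: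
--                 groups[i] = [6]
--             elif groups[i] == [1, 1, 1]:
--                 groups[i] = [7]
--     if power == 4:
--         for i in range(0, len(groups)):
--             if groups[i] == [0, 0, 0, 0]:
--                 groups[i] = [0]
--             elif groups[i] == [0, 0, 0, 1]:
--                 groups[i] = [1]
--             elif groups[i] == [0, 0, 1, 0]:
--                 groups[i] = [2]
--             elif groups[i] == [0, 0, 1, 1]:
--                 groups[i] = [3]
--             elif groups[i] == [0, 1, 0, 0]:
--                 groups[i] = [4]
--             elif groups[i] == [0, 1, 0, 1]:
--                 groups[i] = [5]
--             elif groups[i] == [0, 1, 1, 0]: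
--                 groups[i] = [6]
--             elif groups[i] == [0, 1, 1, 1]:
--                 groups[i] = [7]
--             elif groups[i] == [1, 0, 0, 0]:
--                 groups[i] = [8]
--             elif groups[i] == [1, 0, 0, 1]:
--                 groups[i] = [9]
--             elif groups[i] == [1, 0, 1, 0]:
--                 groups[i] = [10]
--             elif groups[i] == [1, 0, 1, 1]:
--                 groups[i] = [11]
--             elif groups[i] == [1, 1, 0, 0]:
--                 groups[i] = [12]
--             elif groups[i] == [1, 1, 0, 1]:
--                 groups[i] = [13]
--             elif groups[i] == [1, 1, 1, 0]:
--                 groups[i] = [14]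
--             elif groups[i] == [1, 1, 1, 1]:
--                 groups[i] = [15]
--     return groups
-- ===== SOURCE B (Python) =====
-- def from2toPower(groups, power):
--     '''Same conversion, computed positionally instead of via lookup tables.'''
--     if power in (2, 3, 4):
--         for i, group in enumerate(groups):
--             if len(group) == power and all(b == 0 or b == 1 for b in group):
--                 value = 0
--                 for b in group:
--                     value = value * 2 + b
--                 groups[i] = [value]
--     return groups
-- ===== Notes on version B (the rewrite author's own statement) =====
-- stated objective: simpler
-- what changed: Replaces the three hand-enumerated lookup tables of list-equality comparisons (28 literal cases) with one loop computing each group's value positionally (value = value*2 + bit) after checking the group is a length-power list of 0/1 bits.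
import Mathlib
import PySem

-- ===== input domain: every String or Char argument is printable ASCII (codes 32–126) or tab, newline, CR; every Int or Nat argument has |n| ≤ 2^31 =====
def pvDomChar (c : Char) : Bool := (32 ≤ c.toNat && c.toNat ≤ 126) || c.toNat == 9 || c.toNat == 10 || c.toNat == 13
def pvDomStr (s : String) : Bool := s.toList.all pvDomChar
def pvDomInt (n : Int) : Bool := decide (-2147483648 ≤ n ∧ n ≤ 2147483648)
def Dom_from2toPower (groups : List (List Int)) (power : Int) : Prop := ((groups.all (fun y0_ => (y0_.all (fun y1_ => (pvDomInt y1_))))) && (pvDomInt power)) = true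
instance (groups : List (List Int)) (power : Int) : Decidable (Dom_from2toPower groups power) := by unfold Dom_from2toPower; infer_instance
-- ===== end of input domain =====

-- B replaces A's three enumerated lookup tables (28 literal list comparisons) with one
-- positional binary-to-int computation per group; objective: simpler.
-- Python A and B both mutate `groups` in place; the equivalence proved is about the returned list.

-- ===== PORT A =====
-- the power == 2 table: groups[i] rewritten by the chain of list-equality tests
def pvConv2 (g : List Int) : List Int :=
  if g = [0, 0] then [0]
  else if g = [0, 1] then [1]
  else if g = [1, 0] then [2]
  else if g = [1, 1] then [3]
  else g

-- the power == 3 table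
def pvConv3 (g : List Int) : List Int :=
  if g = [0, 0, 0] then [0]
  else if g = [0, 0, 1] then [1]
  else if g = [0, 1, 0] then [2]
  else if g = [0, 1, 1] then [3]
  else if g = [1, 0, 0] then [4]
  else if g = [1, 0, 1] then [5]
  else if g = [1, 1, 0] then [6]
  else if g = [1, 1, 1] then [7]
  else g

-- the power == 4 table
def pvConv4 (g : List Int) : List Int :=
  if g = [0, 0, 0, 0] then [0]
  else if g = [0, 0, 0, 1] then [1]
  else if g = [0, 0, 1, 0] then [2]
  else if g = [0, 0, 1, 1] then [3]
  else if g = [0, 1, 0, 0] then [4]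
  else if g = [0, 1, 0, 1] then [5]
  else if g = [0, 1, 1, 0] then [6]
  else if g = [0, 1, 1, 1] then [7]
  else if g = [1, 0, 0, 0] then [8]
  else if g = [1, 0, 0, 1] then [9]
  else if g = [1, 0, 1, 0] then [10]
  else if g = [1, 0, 1, 1] then [11]
  else if g = [1, 1, 0, 0] then [12]
  else if g = [1, 1, 0, 1] then [13]
  else if g = [1, 1, 1, 0] then [14]
  else if g = [1, 1, 1, 1] then [15]
  else g

-- A: three successive `if power == k:` blocks, each rewriting every groups[i] through its table
def from2toPower (groups : List (List Int)) (power : Int) : List (List Int) :=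
  let g1 := if power = 2 then groups.map pvConv2 else groups
  let g2 := if power = 3 then g1.map pvConv3 else g1
  let g3 := if power = 4 then g2.map pvConv4 else g2
  g3

-- ===== PORT B =====
-- the inner loop `value = value * 2 + b`
def pvBinVal (g : List Int) : Int := g.foldl (fun v b => v * 2 + b) 0

-- B's per-group rewrite: length == power and all elements 0/1 → positional value
def pvConvB (power : Int) (g : List Int) : List Int :=
  if (g.length : Int) = power ∧ (∀ b ∈ g, b = 0 ∨ b = 1)
  then [pvBinVal g] else g

def from2toPower_alt (groups : List (List Int)) (power : Int) : List (List Int) :=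
  if power = 2 ∨ power = 3 ∨ power = 4 then groups.map (pvConvB power) else groups

-- ===== PRECONDITION & SPEC =====
def Spec_from2toPower (groups : List (List Int)) (power : Int) (out : List (List Int)) : Prop := out = from2toPower_alt groups power
instance (groups : List (List Int)) (power : Int) (out : List (List Int)) : Decidable (Spec_from2toPower groups power out) := by unfold Spec_from2toPower; infer_instance

-- ===== CLAIM (what is proved, stated in full; the proofs are below) =====
def Claim_equal_from2toPower : Prop := ∀ (groups : List (List Int)) (power : Int), Dom_from2toPower groups power → Spec_from2toPower groups power (from2toPower groups power)

-- ===== LEMMAS AND PROOFS =====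

lemma pvConv2_eq (g : List Int) : pvConv2 g = pvConvB 2 g := by
  match g with
  | [] => decide
  | [a] => simp [pvConv2, pvConvB]
  | [a, b] =>
    simp only [pvConv2, pvConvB, pvBinVal, List.length_cons, List.length_nil,
      List.forall_mem_cons, List.cons.injEq, and_true, List.foldl]
    split_ifs <;> first | rfl | simp_all <;> omega
  | a :: b :: c :: t =>
    simp [pvConv2, pvConvB]; intros; exfalso; omega

lemma pvConv3_eq (g : List Int) : pvConv3 g = pvConvB 3 g := by
  match g with
  | [] => decide
  | [a] => simp [pvConv3, pvConvB]
  | [a, b] => simp [pvConv3, pvConvB]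
  | [a, b, c] =>
    simp only [pvConv3, pvConvB, pvBinVal, List.length_cons, List.length_nil,
      List.forall_mem_cons, List.cons.injEq, and_true, List.foldl]
    split_ifs <;> first | rfl | simp_all <;> omega
  | a :: b :: c :: d :: t =>
    simp [pvConv3, pvConvB]; intros; exfalso; omega

set_option maxHeartbeats 1600000 in
lemma pvConv4_eq (g : List Int) : pvConv4 g = pvConvB 4 g := by
  match g with
  | [] => decide
  | [a] => simp [pvConv4, pvConvB]
  | [a, b] => simp [pvConv4, pvConvB]
  | [a, b, c] => simp [pvConv4, pvConvB]
  | [a, b, c, d] =>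
    by_cases hgood : (a = 0 ∨ a = 1) ∧ (b = 0 ∨ b = 1) ∧ (c = 0 ∨ c = 1) ∧ (d = 0 ∨ d = 1)
    · obtain ⟨ha, hb, hc, hd⟩ := hgood
      rcases ha with rfl | rfl <;> rcases hb with rfl | rfl <;> rcases hc with rfl | rfl <;>
        rcases hd with rfl | rfl <;> decide
    · have hne : ∀ w x y z : Int,
          ((w = 0 ∨ w = 1) ∧ (x = 0 ∨ x = 1) ∧ (y = 0 ∨ y = 1) ∧ (z = 0 ∨ z = 1)) →
          ¬([a, b, c, d] = [w, x, y, z]) := by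
        intro w x y z hw heq
        simp only [List.cons.injEq, and_true] at heq
        obtain ⟨rfl, rfl, rfl, rfl⟩ := heq
        exact hgood hw
      have hB : ¬((([a, b, c, d] : List Int).length : Int) = 4 ∧
          ∀ x ∈ ([a, b, c, d] : List Int), x = 0 ∨ x = 1) := by
        rintro ⟨-, hall⟩
        exact hgood ⟨hall a (by simp), hall b (by simp), hall c (by simp), hall d (by simp)⟩
      unfold pvConv4 pvConvB
      rw [if_neg (hne 0 0 0 0 (by decide)), if_neg (hne 0 0 0 1 (by decide)), if_neg (hne 0 0 1 0 (by decide)), if_neg (hne 0 0 1 1 (by decide)), if_neg (hne 0 1 0 0 (by decide)), if_neg (hne 0 1 0 1 (by decide)), if_neg (hne 0 1 1 0 (by decide)), if_neg (hne 0 1 1 1 (by decide)), if_neg (hne 1 0 0 0 (by decide)), if_neg (hne 1 0 0 1 (by decide)), if_neg (hne 1 0 1 0 (by decide)), if_neg (hne 1 0 1 1 (by decide)), if_neg (hne 1 1 0 0 (by decide)), if_neg (hne 1 1 0 1 (by decide)), if_neg (hne 1 1 1 0 (by decide)), if_neg (hne 1 1 1 1 (by decide)), if_neg hB]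
  | a :: b :: c :: d :: e :: t =>
    simp [pvConv4, pvConvB]; intros; exfalso; omega

-- ===== VERDICT (by name: the statement is the Claim_ definition above) =====
theorem from2toPower_spec : Claim_equal_from2toPower := by
  intro groups power _
  unfold Spec_from2toPower from2toPower from2toPower_alt
  by_cases h2 : power = 2
  · subst h2
    simp [List.map_congr_left (fun g _ => pvConv2_eq g)]
  · by_cases h3 : power = 3
    · subst h3
      simp [List.map_congr_left (fun g _ => pvConv3_eq g)]
    · by_cases h4 : power = 4
      · subst h4
        simp [List.map_congr_left (fun g _ => pvConv4_eq g)]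
      · simp [h2, h3, h4]
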